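-- pv_equiv track=rewrite | github.com/KenanZhu/KNZ_Convert | rnx_convert.py | obsfmt2_conv
-- ===== SOURCE A (Python) =====
-- def obsfmt2_conv(obstypes, sys):
--
--   counter =0
--   obstypex=[]
--   obsbomit=''
--
--   match sys:
--     case 'G':
--       for obs in obstypes:
--         counter+=1
--         if   obs[1:2]=='1':
--           if obs[0:1]=='P': obs='C1W'
--           else: obs+='C'
--         elif obs[1:2]=='2':
--           if obs[0:1]=='P': obs='C2W'
--           else: obs+='C'
--         elif obs[1:2]=='5': obs+='I'
--         else:
--           obsbomit+=('%02d'%counter)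
--           continue
--         obstypex.append(obs)
--     case 'E':
--       for obs in obstypes:
--         counter+=1
--         if   obs[1:2]=='1':
--           if obs[0:1]=='P':
--             obsbomit+=('%02d'%counter)
--             continue
--           else: obs+='C'
--         elif obs[1:2]=='5': obs+='I'
--         elif obs[1:2]=='6': obs+='C'
--         elif obs[1:2]=='7': obs+='I'
--         elif obs[1:2]=='8': obs+='I'
--         else:
--           obsbomit+=('%02d'%counter)
--           continue
--         obstypex.append(obs)
--     case 'R':
--       for obs in obstypes:
--         counter+=1
--         if   obs[1:2]=='1':
--           if obs[0:1]=='P': obs='C1P'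
--           else: obs+='C'
--         elif obs[1:2]=='2':
--           if obs[0:1]=='P': obs='C2P'
--           else: obs+='C'
--         else:
--           obsbomit+=('%02d'%counter)
--           continue
--         obstypex.append(obs)
--     case 'S':
--       for obs in obstypes:
--         counter+=1
--         if   obs[1:2]=='1':
--           if obs[0:1]=='P':
--             obsbomit+=('%02d'%counter)
--             continue
--           else: obs+='C'
--         elif obs[1:2]=='5': obs+='I'
--         else:
--           obsbomit+=('%02d'%counter)
--           continue
--         obstypex.append(obs)
--
--   obstypex.append(obsbomit)
--
--   return obstypex
-- ===== SOURCE B (Python) =====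
-- # Staged pipeline: a pure per-code classifier is mapped over the list once, then kept
-- # codes and omitted 1-based indices are extracted by two comprehensions (no running state).
-- _SUFFIX = {('G', '1'): 'C', ('G', '2'): 'C', ('G', '5'): 'I',
--            ('E', '1'): 'C', ('E', '5'): 'I', ('E', '6'): 'C',
--            ('E', '7'): 'I', ('E', '8'): 'I',
--            ('R', '1'): 'C', ('R', '2'): 'C',
--            ('S', '1'): 'C', ('S', '5'): 'I'}
-- _P_OVERRIDE = {('G', '1'): 'C1W', ('G', '2'): 'C2W',
--                ('R', '1'): 'C1P', ('R', '2'): 'C2P',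
--                ('E', '1'): None, ('S', '1'): None}
--
-- def _transform(obs, sys):
--     key = (sys, obs[1:2])
--     if obs[0:1] == 'P' and key in _P_OVERRIDE:
--         return _P_OVERRIDE[key]
--     suf = _SUFFIX.get(key)
--     return None if suf is None else obs + suf
--
-- def obsfmt2_conv(obstypes, sys):
--     if sys not in ('G', 'E', 'R', 'S'):
--         return ['']
--     mapped = [_transform(obs, sys) for obs in obstypes]
--     kept = [t for t in mapped if t is not None]
--     omitted = ''.join('%02d' % i for i, t in enumerate(mapped, 1) if t is None)
--     return kept + [omitted]
-- ===== Notes on version B (the rewrite author's own statement) =====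
-- stated objective: simpler
-- what changed: A's four copy-pasted stateful loops (counter plus two mutable accumulators) are replaced by a stateless staged pipeline: a pure per-code classifier returning Optional[str] is mapped over the list once, then kept codes and omitted 1-based indices are extracted by two separate comprehensions.
import Mathlib
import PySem

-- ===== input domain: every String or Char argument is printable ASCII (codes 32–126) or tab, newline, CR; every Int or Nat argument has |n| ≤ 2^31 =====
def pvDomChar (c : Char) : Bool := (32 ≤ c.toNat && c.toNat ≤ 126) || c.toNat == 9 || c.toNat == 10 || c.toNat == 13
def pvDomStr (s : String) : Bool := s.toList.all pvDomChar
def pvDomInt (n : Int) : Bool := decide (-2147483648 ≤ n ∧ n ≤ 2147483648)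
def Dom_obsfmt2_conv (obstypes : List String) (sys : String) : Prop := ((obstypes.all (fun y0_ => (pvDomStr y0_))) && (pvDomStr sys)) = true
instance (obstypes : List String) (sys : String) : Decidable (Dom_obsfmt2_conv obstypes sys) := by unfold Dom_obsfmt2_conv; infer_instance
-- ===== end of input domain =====

-- B replaces A's four copy-pasted stateful loops by a stateless staged pipeline
-- (pure classifier mapped once, then two comprehensions); objective: simpler.

-- ===== PORT A =====
-- '%02d' % n — exact for every Int (for 0 ≤ n < 10 pad with '0'; the sign already fills the width otherwise)
def pvFmt02 (n : Int) : List Char :=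
  if 0 ≤ n ∧ n < 10 then '0' :: PySem.Int.toChars n else PySem.Int.toChars n

-- obs[1:2] and obs[0:1]
def pvBand (obs : String) : List Char := PySem.Chars.slice obs.toList (some 1) (some 2)
def pvHead (obs : String) : List Char := PySem.Chars.slice obs.toList (some 0) (some 1)

-- loop state: (counter, obstypex, obsbomit as chars)
def pvStepG (st : Int × List String × List Char) (obs : String) : Int × List String × List Char :=
  let c := st.1 + 1
  if pvBand obs = ['1'] then
    if pvHead obs = ['P'] then (c, st.2.1 ++ ["C1W"], st.2.2)
    else (c, st.2.1 ++ [String.ofList (obs.toList ++ ['C'])], st.2.2)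
  else if pvBand obs = ['2'] then
    if pvHead obs = ['P'] then (c, st.2.1 ++ ["C2W"], st.2.2)
    else (c, st.2.1 ++ [String.ofList (obs.toList ++ ['C'])], st.2.2)
  else if pvBand obs = ['5'] then (c, st.2.1 ++ [String.ofList (obs.toList ++ ['I'])], st.2.2)
  else (c, st.2.1, st.2.2 ++ pvFmt02 c)

def pvStepE (st : Int × List String × List Char) (obs : String) : Int × List String × List Char :=
  let c := st.1 + 1
  if pvBand obs = ['1'] then
    if pvHead obs = ['P'] then (c, st.2.1, st.2.2 ++ pvFmt02 c)
    else (c, st.2.1 ++ [String.ofList (obs.toList ++ ['C'])], st.2.2)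
  else if pvBand obs = ['5'] then (c, st.2.1 ++ [String.ofList (obs.toList ++ ['I'])], st.2.2)
  else if pvBand obs = ['6'] then (c, st.2.1 ++ [String.ofList (obs.toList ++ ['C'])], st.2.2)
  else if pvBand obs = ['7'] then (c, st.2.1 ++ [String.ofList (obs.toList ++ ['I'])], st.2.2)
  else if pvBand obs = ['8'] then (c, st.2.1 ++ [String.ofList (obs.toList ++ ['I'])], st.2.2)
  else (c, st.2.1, st.2.2 ++ pvFmt02 c)

def pvStepR (st : Int × List String × List Char) (obs : String) : Int × List String × List Char :=
  let c := st.1 + 1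
  if pvBand obs = ['1'] then
    if pvHead obs = ['P'] then (c, st.2.1 ++ ["C1P"], st.2.2)
    else (c, st.2.1 ++ [String.ofList (obs.toList ++ ['C'])], st.2.2)
  else if pvBand obs = ['2'] then
    if pvHead obs = ['P'] then (c, st.2.1 ++ ["C2P"], st.2.2)
    else (c, st.2.1 ++ [String.ofList (obs.toList ++ ['C'])], st.2.2)
  else (c, st.2.1, st.2.2 ++ pvFmt02 c)

def pvStepS (st : Int × List String × List Char) (obs : String) : Int × List String × List Char :=
  let c := st.1 + 1
  if pvBand obs = ['1'] then
    if pvHead obs = ['P'] then (c, st.2.1, st.2.2 ++ pvFmt02 c)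
    else (c, st.2.1 ++ [String.ofList (obs.toList ++ ['C'])], st.2.2)
  else if pvBand obs = ['5'] then (c, st.2.1 ++ [String.ofList (obs.toList ++ ['I'])], st.2.2)
  else (c, st.2.1, st.2.2 ++ pvFmt02 c)

def obsfmt2_conv (obstypes : List String) (sys : String) : List String :=
  let st : Int × List String × List Char :=
    if sys = "G" then obstypes.foldl pvStepG (0, [], [])
    else if sys = "E" then obstypes.foldl pvStepE (0, [], [])
    else if sys = "R" then obstypes.foldl pvStepR (0, [], [])
    else if sys = "S" then obstypes.foldl pvStepS (0, [], [])
    else (0, [], [])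
  st.2.1 ++ [String.ofList st.2.2]

-- ===== PORT B =====
-- _SUFFIX: (sys, band) -> suffix appended to a kept code
def pvSuffix : PySem.Dict (String × String) String :=
  PySem.Dict.ofList
    [(("G", "1"), "C"), (("G", "2"), "C"), (("G", "5"), "I"),
     (("E", "1"), "C"), (("E", "5"), "I"), (("E", "6"), "C"),
     (("E", "7"), "I"), (("E", "8"), "I"),
     (("R", "1"), "C"), (("R", "2"), "C"),
     (("S", "1"), "C"), (("S", "5"), "I")]
-- _P_OVERRIDE: (sys, band) -> result for a 'P'-prefixed code (none = omitted)
def pvPOverride : PySem.Dict (String × String) (Option String) :=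
  PySem.Dict.ofList
    [(("G", "1"), some "C1W"), (("G", "2"), some "C2W"),
     (("R", "1"), some "C1P"), (("R", "2"), some "C2P"),
     (("E", "1"), none), (("S", "1"), none)]

-- _transform: pure classifier, none = this code is omitted
def pvTransform (obs sys : String) : Option String :=
  let key : String × String := (sys, String.ofList (pvBand obs))
  if pvHead obs = ['P'] ∧ (pvPOverride.get? key).isSome then
    (pvPOverride.get? key).getD none
  else
    match pvSuffix.get? key with
    | none => none
    | some suf => some (String.ofList (obs.toList ++ suf.toList))

def obsfmt2_conv_alt (obstypes : List String) (sys : String) : List String :=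
  if sys = "G" ∨ sys = "E" ∨ sys = "R" ∨ sys = "S" then
    let mapped := obstypes.map (fun obs => pvTransform obs sys)
    let kept := mapped.filterMap id
    let omitted := PySem.Str.join ""
      (((PySem.List.enumerate mapped 1).filter (fun p => p.2.isNone)).map
        (fun p => String.ofList (pvFmt02 p.1)))
    kept ++ [omitted]
  else [""]

-- ===== PRECONDITION & SPEC =====
def Spec_obsfmt2_conv (obstypes : List String) (sys : String) (out : List String) : Prop := out = obsfmt2_conv_alt obstypes sys
instance (obstypes : List String) (sys : String) (out : List String) : Decidable (Spec_obsfmt2_conv obstypes sys out) := by unfold Spec_obsfmt2_conv; infer_instance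

-- ===== CLAIM (what is proved, stated in full; the proofs are below) =====
def Claim_equal_obsfmt2_conv : Prop := ∀ (obstypes : List String) (sys : String), Dom_obsfmt2_conv obstypes sys → Spec_obsfmt2_conv obstypes sys (obsfmt2_conv obstypes sys)

-- ===== LEMMAS AND PROOFS =====
def pvFlat (om : List String) : List Char := (om.map String.toList).flatten

theorem pvFlat_append (om : List String) (s : List Char) :
    pvFlat (om ++ [String.ofList s]) = pvFlat om ++ s := by
  simp [pvFlat]

theorem pvJoinNil (lss : List (List Char)) : PySem.Chars.join [] lss = lss.flatten := by
  simp only [PySem.Chars.join, List.intercalate]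
  induction lss with
  | nil => rfl
  | cons a t ih =>
    cases t with
    | nil => simp
    | cons b u => simp_all [List.intersperse]

theorem pvStrJoinNil (om : List String) :
    PySem.Str.join "" om = String.ofList (pvFlat om) := by
  simp [PySem.Str.join, pvJoinNil, pvFlat]

theorem pvBand_eq (obs : String) : pvBand obs = (obs.toList.drop 1).take 1 := by
  simp [pvBand, pysem]

theorem pvHead_eq (obs : String) : pvHead obs = obs.toList.take 1 := by
  simp [pvHead, pysem]

theorem pvOfList_singleton_eq (c d : Char) : String.ofList [c] = String.ofList [d] ↔ c = d := by
  rw [String.ofList_inj]; simp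

def pvPOverrideEntries : List ((String × String) × Option String) :=
  [(("G", "1"), some "C1W"), (("G", "2"), some "C2W"),
   (("R", "1"), some "C1P"), (("R", "2"), some "C2P"),
   (("E", "1"), none), (("S", "1"), none)]
def pvSuffixEntries : List ((String × String) × String) :=
  [(("G", "1"), "C"), (("G", "2"), "C"), (("G", "5"), "I"),
   (("E", "1"), "C"), (("E", "5"), "I"), (("E", "6"), "C"),
   (("E", "7"), "I"), (("E", "8"), "I"),
   (("R", "1"), "C"), (("R", "2"), "C"),
   (("S", "1"), "C"), (("S", "5"), "I")]

theorem pvPO_none_G (s : String) (h1 : s ≠ "1") (h2 : s ≠ "2") :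
    pvPOverride.get? ("G", s) = none := by
  rw [show pvPOverride = PySem.Dict.mk pvPOverrideEntries from by decide]
  simp [pvPOverrideEntries, PySem.Dict.get?_mk_cons, Ne.symm h1, Ne.symm h2,
    show ∀ k : String × String, (PySem.Dict.mk ([] : List ((String × String) × Option String))).get? k = none from fun _ => rfl]

theorem pvSuf_none_G (s : String) (h1 : s ≠ "1") (h2 : s ≠ "2") (h5 : s ≠ "5") :
    pvSuffix.get? ("G", s) = none := by
  rw [show pvSuffix = PySem.Dict.mk pvSuffixEntries from by decide]
  simp [pvSuffixEntries, PySem.Dict.get?_mk_cons, Ne.symm h1, Ne.symm h2, Ne.symm h5,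
    show ∀ k : String × String, (PySem.Dict.mk ([] : List ((String × String) × String))).get? k = none from fun _ => rfl]

theorem pvPO_none_E (s : String) (h1 : s ≠ "1") :
    pvPOverride.get? ("E", s) = none := by
  rw [show pvPOverride = PySem.Dict.mk pvPOverrideEntries from by decide]
  simp [pvPOverrideEntries, PySem.Dict.get?_mk_cons, Ne.symm h1,
    show ∀ k : String × String, (PySem.Dict.mk ([] : List ((String × String) × Option String))).get? k = none from fun _ => rfl]

theorem pvSuf_none_E (s : String) (h1 : s ≠ "1") (h5 : s ≠ "5") (h6 : s ≠ "6") (h7 : s ≠ "7") (h8 : s ≠ "8") :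
    pvSuffix.get? ("E", s) = none := by
  rw [show pvSuffix = PySem.Dict.mk pvSuffixEntries from by decide]
  simp [pvSuffixEntries, PySem.Dict.get?_mk_cons, Ne.symm h1, Ne.symm h5, Ne.symm h6, Ne.symm h7, Ne.symm h8,
    show ∀ k : String × String, (PySem.Dict.mk ([] : List ((String × String) × String))).get? k = none from fun _ => rfl]

theorem pvPO_none_R (s : String) (h1 : s ≠ "1") (h2 : s ≠ "2") :
    pvPOverride.get? ("R", s) = none := by
  rw [show pvPOverride = PySem.Dict.mk pvPOverrideEntries from by decide]
  simp [pvPOverrideEntries, PySem.Dict.get?_mk_cons, Ne.symm h1, Ne.symm h2,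
    show ∀ k : String × String, (PySem.Dict.mk ([] : List ((String × String) × Option String))).get? k = none from fun _ => rfl]

theorem pvSuf_none_R (s : String) (h1 : s ≠ "1") (h2 : s ≠ "2") :
    pvSuffix.get? ("R", s) = none := by
  rw [show pvSuffix = PySem.Dict.mk pvSuffixEntries from by decide]
  simp [pvSuffixEntries, PySem.Dict.get?_mk_cons, Ne.symm h1, Ne.symm h2,
    show ∀ k : String × String, (PySem.Dict.mk ([] : List ((String × String) × String))).get? k = none from fun _ => rfl]

theorem pvPO_none_S (s : String) (h1 : s ≠ "1") :
    pvPOverride.get? ("S", s) = none := by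
  rw [show pvPOverride = PySem.Dict.mk pvPOverrideEntries from by decide]
  simp [pvPOverrideEntries, PySem.Dict.get?_mk_cons, Ne.symm h1,
    show ∀ k : String × String, (PySem.Dict.mk ([] : List ((String × String) × Option String))).get? k = none from fun _ => rfl]

theorem pvSuf_none_S (s : String) (h1 : s ≠ "1") (h5 : s ≠ "5") :
    pvSuffix.get? ("S", s) = none := by
  rw [show pvSuffix = PySem.Dict.mk pvSuffixEntries from by decide]
  simp [pvSuffixEntries, PySem.Dict.get?_mk_cons, Ne.symm h1, Ne.symm h5,
    show ∀ k : String × String, (PySem.Dict.mk ([] : List ((String × String) × String))).get? k = none from fun _ => rfl]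

theorem pvStepG_alt (c : Int) (tx om : List String) (obs : String) :
    pvStepG (c, tx, pvFlat om) obs =
      match pvTransform obs "G" with
      | some t => (c+1, tx ++ [t], pvFlat om)
      | none   => (c+1, tx, pvFlat (om ++ [String.ofList (pvFmt02 (c+1))])) := by
  have hb := pvBand_eq obs
  have hh := pvHead_eq obs
  rcases htl : obs.toList with _ | ⟨c0, rest⟩
  · simp [pvStepG, pvTransform, hb, hh, htl, pvFlat_append,
      pvPO_none_G (String.ofList []) (by decide) (by decide),
      pvSuf_none_G (String.ofList []) (by decide) (by decide) (by decide)]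
  · rcases rest with _ | ⟨c1, rest2⟩
    · simp [pvStepG, pvTransform, hb, hh, htl, pvFlat_append,
      pvPO_none_G (String.ofList []) (by decide) (by decide),
      pvSuf_none_G (String.ofList []) (by decide) (by decide) (by decide)]
    · by_cases h1 : c1 = '1'
      · subst h1
        by_cases hP : c0 = 'P' <;>
          simp [pvStepG, pvTransform, hb, hh, htl, hP,
            show pvPOverride.get? ("G", String.ofList ['1']) = some (some "C1W") from by decide,
            show pvSuffix.get? ("G", String.ofList ['1']) = some "C" from by decide,
            show ("C" : String).toList = ['C'] from by decide]
      · by_cases h2 : c1 = '2'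
        · subst h2
          by_cases hP : c0 = 'P' <;>
            simp [pvStepG, pvTransform, hb, hh, htl, hP,
              show pvPOverride.get? ("G", String.ofList ['2']) = some (some "C2W") from by decide,
              show pvSuffix.get? ("G", String.ofList ['2']) = some "C" from by decide,
              show ("C" : String).toList = ['C'] from by decide]
        · by_cases h5 : c1 = '5'
          · subst h5
            by_cases hP : c0 = 'P' <;>
              simp [pvStepG, pvTransform, hb, hh, htl, hP,
                show pvPOverride.get? ("G", String.ofList ['5']) = none from by decide,
                show pvSuffix.get? ("G", String.ofList ['5']) = some "I" from by decide,
                show ("I" : String).toList = ['I'] from by decide]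
          · have hgp := pvPO_none_G (String.ofList [c1]) (fun h => h1 ((pvOfList_singleton_eq c1 '1').mp (h.trans (by decide)))) (fun h => h2 ((pvOfList_singleton_eq c1 '2').mp (h.trans (by decide))))
            have hgs := pvSuf_none_G (String.ofList [c1]) (fun h => h1 ((pvOfList_singleton_eq c1 '1').mp (h.trans (by decide)))) (fun h => h2 ((pvOfList_singleton_eq c1 '2').mp (h.trans (by decide)))) (fun h => h5 ((pvOfList_singleton_eq c1 '5').mp (h.trans (by decide))))
            simp [pvStepG, pvTransform, hb, htl, hgp, hgs, h1, h2, h5, pvFlat_append]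

theorem pvStepE_alt (c : Int) (tx om : List String) (obs : String) :
    pvStepE (c, tx, pvFlat om) obs =
      match pvTransform obs "E" with
      | some t => (c+1, tx ++ [t], pvFlat om)
      | none   => (c+1, tx, pvFlat (om ++ [String.ofList (pvFmt02 (c+1))])) := by
  have hb := pvBand_eq obs
  have hh := pvHead_eq obs
  rcases htl : obs.toList with _ | ⟨c0, rest⟩
  · simp [pvStepE, pvTransform, hb, hh, htl, pvFlat_append,
      pvPO_none_E (String.ofList []) (by decide),
      pvSuf_none_E (String.ofList []) (by decide) (by decide) (by decide) (by decide) (by decide)]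
  · rcases rest with _ | ⟨c1, rest2⟩
    · simp [pvStepE, pvTransform, hb, hh, htl, pvFlat_append,
      pvPO_none_E (String.ofList []) (by decide),
      pvSuf_none_E (String.ofList []) (by decide) (by decide) (by decide) (by decide) (by decide)]
    · by_cases h1 : c1 = '1'
      · subst h1
        by_cases hP : c0 = 'P' <;>
          simp [pvStepE, pvTransform, hb, hh, htl, hP, pvFlat_append,
            show pvPOverride.get? ("E", String.ofList ['1']) = some (none) from by decide,
            show pvSuffix.get? ("E", String.ofList ['1']) = some "C" from by decide,
            show ("C" : String).toList = ['C'] from by decide]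
      · by_cases h5 : c1 = '5'
        · subst h5
          by_cases hP : c0 = 'P' <;>
            simp [pvStepE, pvTransform, hb, hh, htl, hP,
              show pvPOverride.get? ("E", String.ofList ['5']) = none from by decide,
              show pvSuffix.get? ("E", String.ofList ['5']) = some "I" from by decide,
              show ("I" : String).toList = ['I'] from by decide]
        · by_cases h6 : c1 = '6'
          · subst h6
            by_cases hP : c0 = 'P' <;>
              simp [pvStepE, pvTransform, hb, hh, htl, hP,
                show pvPOverride.get? ("E", String.ofList ['6']) = none from by decide,
                show pvSuffix.get? ("E", String.ofList ['6']) = some "C" from by decide,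
                show ("C" : String).toList = ['C'] from by decide]
          · by_cases h7 : c1 = '7'
            · subst h7
              by_cases hP : c0 = 'P' <;>
                simp [pvStepE, pvTransform, hb, hh, htl, hP,
                  show pvPOverride.get? ("E", String.ofList ['7']) = none from by decide,
                  show pvSuffix.get? ("E", String.ofList ['7']) = some "I" from by decide,
                  show ("I" : String).toList = ['I'] from by decide]
            · by_cases h8 : c1 = '8'
              · subst h8
                by_cases hP : c0 = 'P' <;>
                  simp [pvStepE, pvTransform, hb, hh, htl, hP,
                    show pvPOverride.get? ("E", String.ofList ['8']) = none from by decide,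
                    show pvSuffix.get? ("E", String.ofList ['8']) = some "I" from by decide,
                    show ("I" : String).toList = ['I'] from by decide]
              · have hgp := pvPO_none_E (String.ofList [c1]) (fun h => h1 ((pvOfList_singleton_eq c1 '1').mp (h.trans (by decide))))
                have hgs := pvSuf_none_E (String.ofList [c1]) (fun h => h1 ((pvOfList_singleton_eq c1 '1').mp (h.trans (by decide)))) (fun h => h5 ((pvOfList_singleton_eq c1 '5').mp (h.trans (by decide)))) (fun h => h6 ((pvOfList_singleton_eq c1 '6').mp (h.trans (by decide)))) (fun h => h7 ((pvOfList_singleton_eq c1 '7').mp (h.trans (by decide)))) (fun h => h8 ((pvOfList_singleton_eq c1 '8').mp (h.trans (by decide))))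
                simp [pvStepE, pvTransform, hb, htl, hgp, hgs, h1, h5, h6, h7, h8, pvFlat_append]

theorem pvStepR_alt (c : Int) (tx om : List String) (obs : String) :
    pvStepR (c, tx, pvFlat om) obs =
      match pvTransform obs "R" with
      | some t => (c+1, tx ++ [t], pvFlat om)
      | none   => (c+1, tx, pvFlat (om ++ [String.ofList (pvFmt02 (c+1))])) := by
  have hb := pvBand_eq obs
  have hh := pvHead_eq obs
  rcases htl : obs.toList with _ | ⟨c0, rest⟩
  · simp [pvStepR, pvTransform, hb, hh, htl, pvFlat_append,
      pvPO_none_R (String.ofList []) (by decide) (by decide),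
      pvSuf_none_R (String.ofList []) (by decide) (by decide)]
  · rcases rest with _ | ⟨c1, rest2⟩
    · simp [pvStepR, pvTransform, hb, hh, htl, pvFlat_append,
      pvPO_none_R (String.ofList []) (by decide) (by decide),
      pvSuf_none_R (String.ofList []) (by decide) (by decide)]
    · by_cases h1 : c1 = '1'
      · subst h1
        by_cases hP : c0 = 'P' <;>
          simp [pvStepR, pvTransform, hb, hh, htl, hP,
            show pvPOverride.get? ("R", String.ofList ['1']) = some (some "C1P") from by decide,
            show pvSuffix.get? ("R", String.ofList ['1']) = some "C" from by decide,
            show ("C" : String).toList = ['C'] from by decide]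
      · by_cases h2 : c1 = '2'
        · subst h2
          by_cases hP : c0 = 'P' <;>
            simp [pvStepR, pvTransform, hb, hh, htl, hP,
              show pvPOverride.get? ("R", String.ofList ['2']) = some (some "C2P") from by decide,
              show pvSuffix.get? ("R", String.ofList ['2']) = some "C" from by decide,
              show ("C" : String).toList = ['C'] from by decide]
        · have hgp := pvPO_none_R (String.ofList [c1]) (fun h => h1 ((pvOfList_singleton_eq c1 '1').mp (h.trans (by decide)))) (fun h => h2 ((pvOfList_singleton_eq c1 '2').mp (h.trans (by decide))))
          have hgs := pvSuf_none_R (String.ofList [c1]) (fun h => h1 ((pvOfList_singleton_eq c1 '1').mp (h.trans (by decide)))) (fun h => h2 ((pvOfList_singleton_eq c1 '2').mp (h.trans (by decide))))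
          simp [pvStepR, pvTransform, hb, htl, hgp, hgs, h1, h2, pvFlat_append]

theorem pvStepS_alt (c : Int) (tx om : List String) (obs : String) :
    pvStepS (c, tx, pvFlat om) obs =
      match pvTransform obs "S" with
      | some t => (c+1, tx ++ [t], pvFlat om)
      | none   => (c+1, tx, pvFlat (om ++ [String.ofList (pvFmt02 (c+1))])) := by
  have hb := pvBand_eq obs
  have hh := pvHead_eq obs
  rcases htl : obs.toList with _ | ⟨c0, rest⟩
  · simp [pvStepS, pvTransform, hb, hh, htl, pvFlat_append,
      pvPO_none_S (String.ofList []) (by decide),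
      pvSuf_none_S (String.ofList []) (by decide) (by decide)]
  · rcases rest with _ | ⟨c1, rest2⟩
    · simp [pvStepS, pvTransform, hb, hh, htl, pvFlat_append,
      pvPO_none_S (String.ofList []) (by decide),
      pvSuf_none_S (String.ofList []) (by decide) (by decide)]
    · by_cases h1 : c1 = '1'
      · subst h1
        by_cases hP : c0 = 'P' <;>
          simp [pvStepS, pvTransform, hb, hh, htl, hP, pvFlat_append,
            show pvPOverride.get? ("S", String.ofList ['1']) = some (none) from by decide,
            show pvSuffix.get? ("S", String.ofList ['1']) = some "C" from by decide,
            show ("C" : String).toList = ['C'] from by decide]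
      · by_cases h5 : c1 = '5'
        · subst h5
          by_cases hP : c0 = 'P' <;>
            simp [pvStepS, pvTransform, hb, hh, htl, hP,
              show pvPOverride.get? ("S", String.ofList ['5']) = none from by decide,
              show pvSuffix.get? ("S", String.ofList ['5']) = some "I" from by decide,
              show ("I" : String).toList = ['I'] from by decide]
        · have hgp := pvPO_none_S (String.ofList [c1]) (fun h => h1 ((pvOfList_singleton_eq c1 '1').mp (h.trans (by decide))))
          have hgs := pvSuf_none_S (String.ofList [c1]) (fun h => h1 ((pvOfList_singleton_eq c1 '1').mp (h.trans (by decide)))) (fun h => h5 ((pvOfList_singleton_eq c1 '5').mp (h.trans (by decide))))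
          simp [pvStepS, pvTransform, hb, htl, hgp, hgs, h1, h5, pvFlat_append]

-- generic: a per-element agreement with the classifier lifts to the whole loop
theorem pvFoldGen (f : String → Option String)
    (stepA : Int × List String × List Char → String → Int × List String × List Char)
    (hstep : ∀ (c : Int) (tx : List String) (om : List String) (obs : String),
      stepA (c, tx, pvFlat om) obs =
        match f obs with
        | some t => (c+1, tx ++ [t], pvFlat om)
        | none   => (c+1, tx, pvFlat (om ++ [String.ofList (pvFmt02 (c+1))]))) :
    ∀ (l : List String) (c : Int) (tx om : List String),
      l.foldl stepA (c, tx, pvFlat om) =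
        ((c + l.length : Int),
         tx ++ (l.map f).filterMap id,
         pvFlat (om ++ ((PySem.List.enumerate (l.map f) (c+1)).filter (fun p => p.2.isNone)).map
           (fun p => String.ofList (pvFmt02 p.1)))) := by
  intro l
  induction l with
  | nil => intro c tx om; simp [PySem.List.enumerate_nil]
  | cons obs t ih =>
    intro c tx om
    rw [List.foldl_cons, hstep]
    rcases hf : f obs with _ | v
    · simp only
      rw [ih (c+1) tx (om ++ [String.ofList (pvFmt02 (c+1))])]
      refine Prod.ext ?_ ?_
      · simp; ring
      · refine Prod.ext ?_ ?_
        · simp [hf]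
        · simp only [List.map_cons, PySem.List.enumerate_cons, hf, List.filter_cons]
          simp [List.append_assoc]
    · simp only
      rw [ih (c+1) (tx ++ [v]) om]
      refine Prod.ext ?_ ?_
      · simp; ring
      · refine Prod.ext ?_ ?_
        · simp [hf]
        · simp only [List.map_cons, PySem.List.enumerate_cons, hf, List.filter_cons]
          simp

theorem obsfmt2_conv_branch (obstypes : List String) (sysc : String)
    (stepA : Int × List String × List Char → String → Int × List String × List Char)
    (hstep : ∀ (c : Int) (tx : List String) (om : List String) (obs : String),
      stepA (c, tx, pvFlat om) obs =
        match pvTransform obs sysc with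
        | some t => (c+1, tx ++ [t], pvFlat om)
        | none   => (c+1, tx, pvFlat (om ++ [String.ofList (pvFmt02 (c+1))]))) :
    (obstypes.foldl stepA (0, [], [])).2.1 ++ [String.ofList (obstypes.foldl stepA (0, [], [])).2.2] =
      (obstypes.map (fun obs => pvTransform obs sysc)).filterMap id ++
        [PySem.Str.join ""
          (((PySem.List.enumerate (obstypes.map (fun obs => pvTransform obs sysc)) 1).filter
              (fun p => p.2.isNone)).map (fun p => String.ofList (pvFmt02 p.1)))] := by
  have h := pvFoldGen (fun obs => pvTransform obs sysc) stepA hstep obstypes 0 [] []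
  have h0 : pvFlat ([] : List String) = [] := rfl
  rw [h0] at h
  rw [h]
  simp [pvStrJoinNil]

theorem obsfmt2_conv_spec : Claim_equal_obsfmt2_conv := by
  intro obstypes sys _
  unfold Spec_obsfmt2_conv obsfmt2_conv obsfmt2_conv_alt
  by_cases hG : sys = "G"
  · subst hG
    simpa using obsfmt2_conv_branch obstypes "G" pvStepG pvStepG_alt
  by_cases hE : sys = "E"
  · subst hE
    simpa [hG] using obsfmt2_conv_branch obstypes "E" pvStepE pvStepE_alt
  by_cases hR : sys = "R"
  · subst hR
    simpa [hG, hE] using obsfmt2_conv_branch obstypes "R" pvStepR pvStepR_alt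
  by_cases hS : sys = "S"
  · subst hS
    simpa [hG, hE, hR] using obsfmt2_conv_branch obstypes "S" pvStepS pvStepS_alt
  · simp [hG, hE, hR, hS]
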